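-- pv_equiv track=rewrite | github.com/Aakash2307/Skillians | Class_codes_DSA/stacks/unti.py | Max_of_ones
-- ===== SOURCE A (Python) =====
-- def Max_of_ones(s):
--     original_count = s.count('1')
--
--
--     gain = []
--     for i in s:
--         if i == '0':
--             gain.append(1)
--         else:
--             gain.append(-1)
--
--     max_count = curr = gain[0]
--     for j in gain[1:]:
--         curr = max(j, j+curr)
--         max_count = max(max_count, curr)
--
--
--     return max_count + original_count
-- ===== SOURCE B (Python) =====
-- def Max_of_ones(s):
--     run = 0
--     min_prefix = 0
--     best = None
--     for c in s:
--         run += 1 if c == '0' else -1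
--         cand = run - min_prefix
--         if best is None or cand > best:
--             best = cand
--         if run < min_prefix:
--             min_prefix = run
--     return best + s.count('1')
-- ===== Notes on version B (the rewrite author's own statement) =====
-- stated objective: faster
-- what changed: Replaced the materialized gain list plus Kadane's max-ending-here recurrence with a single direct scan over the string maintaining a running prefix sum and the minimum prefix seen so far (best window = run - min_prefix), avoiding building and slicing the gain list (O(1) extra space).
import Mathlib
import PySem

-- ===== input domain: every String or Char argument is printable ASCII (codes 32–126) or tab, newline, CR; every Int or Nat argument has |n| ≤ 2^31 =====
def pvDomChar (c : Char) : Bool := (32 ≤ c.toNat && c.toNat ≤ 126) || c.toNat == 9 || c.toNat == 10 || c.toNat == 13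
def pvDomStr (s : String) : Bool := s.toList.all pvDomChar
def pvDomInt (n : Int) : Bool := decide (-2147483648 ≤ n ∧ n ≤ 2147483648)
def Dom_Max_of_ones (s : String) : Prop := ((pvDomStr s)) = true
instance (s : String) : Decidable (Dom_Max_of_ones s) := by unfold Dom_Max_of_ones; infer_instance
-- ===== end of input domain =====

-- B replaces A's gain list + Kadane recurrence with a one-pass prefix-sum/min-prefix scan (alternative decomposition, O(1) extra space).


-- ===== PORT A =====
def Max_of_ones (s : String) : Int :=
  let original_count : Int := (PySem.Str.count s "1" : Int)
  let gain : List Int :=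
    s.toList.foldl (fun acc i => acc ++ [if i = '0' then (1 : Int) else -1]) []
  match gain with
  | [] => 0   -- Python raises IndexError on gain[0]; excluded by Pre_
  | g0 :: rest =>
    let st := rest.foldl (fun (p : Int × Int) j =>
        let curr := max j (j + p.2)
        (max p.1 curr, curr)) (g0, g0)
    st.1 + original_count

-- ===== PORT B =====
def Max_of_ones_alt (s : String) : Int :=
  let st := s.toList.foldl (fun (p : Int × Int × Option Int) c =>
      let run := p.1 + (if c = '0' then (1 : Int) else -1)
      let cand := run - p.2.1
      let best : Option Int :=
        match p.2.2 with
        | none => some cand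
        | some b => if cand > b then some cand else some b
      let mp := if run < p.2.1 then run else p.2.1
      (run, mp, best)) (0, 0, none)
  match st.2.2 with
  | none => 0   -- Python raises TypeError (None + int); excluded by Pre_
  | some b => b + (PySem.Str.count s "1" : Int)

-- ===== PRECONDITION & SPEC =====
-- On the empty string A raises IndexError (gain[0]) and B raises TypeError; Pre_ excludes exactly it.
def Pre_Max_of_ones (s : String) : Prop := s.toList ≠ []
instance (s : String) : Decidable (Pre_Max_of_ones s) := by unfold Pre_Max_of_ones; infer_instance
def pvWitness_Max_of_ones : String := "0110"

def Spec_Max_of_ones (s : String) (out : Int) : Prop := out = Max_of_ones_alt s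
instance (s : String) (out : Int) : Decidable (Spec_Max_of_ones s out) := by unfold Spec_Max_of_ones; infer_instance

-- ===== CLAIM (what is proved, stated in full; the proofs are below) =====
def Claim_equal_Max_of_ones : Prop := ∀ (s : String), Dom_Max_of_ones s → Pre_Max_of_ones s → Spec_Max_of_ones s (Max_of_ones s)

-- ===== LEMMAS AND PROOFS =====

-- A's gain-building loop is a map.
lemma gain_foldl_eq_map (l : List Char) (acc : List Int) :
    l.foldl (fun acc i => acc ++ [if i = '0' then (1 : Int) else -1]) acc
      = acc ++ l.map (fun i => if i = '0' then (1 : Int) else -1) := by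
  induction l generalizing acc with
  | nil => simp
  | cons c t ih => simp [List.foldl, ih]

-- Invariant: after both scans have consumed the same (nonempty) prefix, B's best is
-- `some` of A's max_count, provided B's min_prefix mp = min (run - curr) run, where
-- curr is A's max-sum-ending-here and run is B's running prefix sum.
lemma kadane_eq_prefixmin (l : List Char) :
    ∀ (mx curr run mp : Int), mp = min (run - curr) run →
      (l.foldl (fun (p : Int × Int × Option Int) c =>
          let run := p.1 + (if c = '0' then (1 : Int) else -1)
          let cand := run - p.2.1
          let best : Option Int :=
            match p.2.2 with
            | none => some cand
            | some b => if cand > b then some cand else some b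
          let mp := if run < p.2.1 then run else p.2.1
          (run, mp, best)) (run, mp, some mx)).2.2
      = some (((l.map (fun i => if i = '0' then (1 : Int) else -1)).foldl
          (fun (p : Int × Int) j =>
            let curr := max j (j + p.2)
            (max p.1 curr, curr)) (mx, curr)).1) := by
  induction l with
  | nil => intro mx curr run mp h; simp
  | cons c t ih =>
    intro mx curr run mp h
    simp only [List.map, List.foldl]
    generalize (if c = '0' then (1 : Int) else -1) = g
    have hc1 : run + g - mp = max g (g + curr) := by omega
    rw [hc1]
    have hc2 : (if max g (g + curr) > mx then some (max g (g + curr)) else some mx)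
        = some (max mx (max g (g + curr))) := by
      split_ifs with hgt <;> simp <;> omega
    rw [hc2]
    exact ih (max mx (max g (g + curr))) (max g (g + curr)) (run + g)
      (if run + g < mp then run + g else mp) (by split_ifs <;> omega)

-- ===== VERDICT (by name: the statement is the Claim_ definition above) =====
theorem Max_of_ones_spec : Claim_equal_Max_of_ones := by
  intro s _ hpre
  unfold Spec_Max_of_ones Max_of_ones Max_of_ones_alt
  rw [gain_foldl_eq_map]
  cases hl : s.toList with
  | nil => exact absurd hl hpre
  | cons c t =>
    simp only [List.nil_append, List.map, List.foldl]
    generalize (if c = '0' then (1 : Int) else -1) = g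
    have e : (0 : Int) + g - 0 = g := by omega
    rw [e]
    rw [kadane_eq_prefixmin t g g (0 + g) (if (0 : Int) + g < 0 then 0 + g else 0)
      (by split_ifs <;> omega)]
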